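-- pv_equiv track=rewrite | github.com/mbalos16/advent-of-code-2024 | day_05/part_two.py | find_valid_invalid_sequences
-- ===== SOURCE A (Python) =====
-- def valid_sequence(sequence, rule):
--     page = rule[0]
--     if page in sequence:
--         if rule[1] in sequence[: sequence.index(page)]:
--             return False
--     return True
--
-- def find_valid_invalid_sequences(sequences, conditions):
--     # Find all valid and non_valid
--     valid_sequences = []
--     non_valid_sequences = []
--     for sequence in sequences:
--         valid_sequence_count = 0
--         for rule in conditions:
--             if valid_sequence(sequence, rule) == True:
--                 valid_sequence_count += 1
--         if valid_sequence_count == len((conditions)):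
--             valid_sequences.append(sequence)
--         else:
--             for i in range(len(sequence)):
--                 new_sequence = sequence[i:] + sequence[:i]
--             non_valid_sequences.append(sequence)
--     return valid_sequences, non_valid_sequences
-- ===== SOURCE B (Python) =====
-- def find_valid_invalid_sequences(sequences, conditions):
--     # Adjacency map: page -> set of pages that must not precede it.
--     # Each sequence is judged by ONE left-to-right scan with a 'seen' set:
--     # at the first occurrence of a page, if any of its successors was already
--     # seen the ordering is violated (early exit); otherwise mark it seen.
--     succ = {}
--     for rule in conditions:
--         succ.setdefault(rule[0], set()).add(rule[1])
--     valid_sequences = []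
--     non_valid_sequences = []
--     for sequence in sequences:
--         seen = set()
--         ok = True
--         for page in sequence:
--             if page not in seen:
--                 if not seen.isdisjoint(succ.get(page, ())):
--                     ok = False
--                     break
--                 seen.add(page)
--         if ok:
--             valid_sequences.append(sequence)
--         else:
--             non_valid_sequences.append(sequence)
--     return valid_sequences, non_valid_sequences
-- ===== Notes on version B (the rewrite author's own statement) =====
-- stated objective: faster
-- what changed: B builds a successor adjacency map from the rules once and judges each sequence by a single left-to-right scan with a growing 'seen' set and early exit (a violation is detected at the first occurrence of a page one of whose successors was already seen), replacing A's per-rule membership/index/slice scans of each sequence; Pre_ excludes inputs containing a rule with fewer than two entries, where A raises IndexError (or returns only because the lone entry is absent from every sequence) and B raises.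
-- outside the precondition, e.g. on find_valid_invalid_sequences([[2]], [[1]]): A returns ([[2]], []), B raises IndexError
import Mathlib
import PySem

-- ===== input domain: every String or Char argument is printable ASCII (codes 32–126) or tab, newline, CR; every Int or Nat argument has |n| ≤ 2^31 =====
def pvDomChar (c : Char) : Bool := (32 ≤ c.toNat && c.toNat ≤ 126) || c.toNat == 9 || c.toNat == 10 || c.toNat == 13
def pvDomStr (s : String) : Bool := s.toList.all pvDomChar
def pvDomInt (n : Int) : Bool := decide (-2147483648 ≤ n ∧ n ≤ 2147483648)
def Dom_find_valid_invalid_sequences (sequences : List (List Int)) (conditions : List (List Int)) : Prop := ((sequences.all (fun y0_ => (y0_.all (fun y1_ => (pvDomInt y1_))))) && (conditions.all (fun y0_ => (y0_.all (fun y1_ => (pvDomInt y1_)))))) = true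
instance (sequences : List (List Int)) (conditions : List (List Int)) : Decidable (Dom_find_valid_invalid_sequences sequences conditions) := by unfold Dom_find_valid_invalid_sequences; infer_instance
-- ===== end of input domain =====

-- B builds a successor adjacency map from the rules once and judges each sequence by a single
-- left-to-right scan with a growing 'seen' set and early exit, replacing A's per-rule
-- membership/index/slice scans of each sequence (measured faster in a timing run).


-- ===== PORT A =====
def valid_sequence (sequence : List Int) (rule : List Int) : Bool :=
  let page := (PySem.List.pyGet? rule 0).getD 0
  if sequence.contains page then
    if (PySem.List.slice sequence none
          (some (((PySem.List.index? sequence page).getD 0 : Nat) : Int))).contains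
        ((PySem.List.pyGet? rule 1).getD 0) then
      false
    else
      true
  else
    true

def find_valid_invalid_sequences (sequences : List (List Int)) (conditions : List (List Int)) : List (List Int) × List (List Int) :=
  sequences.foldl
    (fun (acc : List (List Int) × List (List Int)) sequence =>
      let valid_sequence_count : Int :=
        conditions.foldl (fun c rule => if valid_sequence sequence rule == true then c + 1 else c) 0
      if valid_sequence_count = (conditions.length : Int) then
        (acc.1 ++ [sequence], acc.2)
      else
        -- dead loop of A, kept for faithfulness: its value is discarded
        let _new_sequence :=
          (PySem.List.pyRange 0 (sequence.length : Int) 1).foldl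
            (fun _ i => PySem.List.slice sequence (some i) none ++ PySem.List.slice sequence none (some i))
            []
        (acc.1, acc.2 ++ [sequence]))
    ([], [])

-- ===== PORT B =====
-- succ: page -> set of pages that must not precede it (rule[0] -> {rule[1], …})
def fvisSucc (conditions : List (List Int)) : PySem.Dict Int (PySem.Set Int) :=
  conditions.foldl
    (fun d rule =>
      let a := (PySem.List.pyGet? rule 0).getD 0
      let b := (PySem.List.pyGet? rule 1).getD 0
      d.insert a (PySem.Set.add (d.getD a PySem.Set.empty) b))
    PySem.Dict.empty

-- one left-to-right scan with a 'seen' set, early exit on the first violation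
def fvisScan (succ : PySem.Dict Int (PySem.Set Int)) (seen : PySem.Set Int) : List Int → Bool
  | [] => true
  | page :: rest =>
    if seen.contains page then
      fvisScan succ seen rest
    else if PySem.Set.isdisjoint seen (succ.getD page PySem.Set.empty) then
      fvisScan succ (PySem.Set.add seen page) rest
    else
      false

def find_valid_invalid_sequences_alt (sequences : List (List Int)) (conditions : List (List Int)) : List (List Int) × List (List Int) :=
  let succ := fvisSucc conditions
  sequences.foldl
    (fun (acc : List (List Int) × List (List Int)) sequence =>
      if fvisScan succ PySem.Set.empty sequence then
        (acc.1 ++ [sequence], acc.2)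
      else
        (acc.1, acc.2 ++ [sequence]))
    ([], [])

-- ===== PRECONDITION & SPEC =====
-- Pre_ excludes inputs with a rule of fewer than two entries: A raises IndexError on rule[0] or
-- rule[1] (except when a lone first entry is absent from every sequence, where A returns but B raises).
def Pre_find_valid_invalid_sequences (sequences : List (List Int)) (conditions : List (List Int)) : Prop :=
  ∀ rule ∈ conditions, 2 ≤ rule.length
instance (sequences : List (List Int)) (conditions : List (List Int)) : Decidable (Pre_find_valid_invalid_sequences sequences conditions) := by unfold Pre_find_valid_invalid_sequences; infer_instance

def pvWitness_find_valid_invalid_sequences : List (List Int) × List (List Int) :=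
  ([[1, 2, 3], [2, 1, 3]], [[1, 2], [3, 4]])

def Spec_find_valid_invalid_sequences (sequences : List (List Int)) (conditions : List (List Int)) (out : List (List Int) × List (List Int)) : Prop := out = find_valid_invalid_sequences_alt sequences conditions
instance (sequences : List (List Int)) (conditions : List (List Int)) (out : List (List Int) × List (List Int)) : Decidable (Spec_find_valid_invalid_sequences sequences conditions out) := by unfold Spec_find_valid_invalid_sequences; infer_instance

-- ===== CLAIM (what is proved, stated in full; the proofs are below) =====
def Claim_equal_find_valid_invalid_sequences : Prop := ∀ (sequences : List (List Int)) (conditions : List (List Int)), Dom_find_valid_invalid_sequences sequences conditions → Pre_find_valid_invalid_sequences sequences conditions → Spec_find_valid_invalid_sequences sequences conditions (find_valid_invalid_sequences sequences conditions)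

-- ===== LEMMAS AND PROOFS =====

-- the adjacency map: b ∈ succ[a] iff some rule has head a and second entry b
theorem fvisSucc_fold_mem : ∀ (conditions : List (List Int)) (d : PySem.Dict Int (PySem.Set Int)) (a b : Int),
    b ∈ (conditions.foldl
          (fun d rule =>
            d.insert ((PySem.List.pyGet? rule 0).getD 0)
              (PySem.Set.add (d.getD ((PySem.List.pyGet? rule 0).getD 0) PySem.Set.empty)
                ((PySem.List.pyGet? rule 1).getD 0)))
          d).getD a PySem.Set.empty ↔
      b ∈ d.getD a PySem.Set.empty ∨
        ∃ r ∈ conditions, (PySem.List.pyGet? r 0).getD 0 = a ∧ (PySem.List.pyGet? r 1).getD 0 = b := by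
  intro conditions
  induction conditions with
  | nil => intro d a b; simp
  | cons r rest ih =>
    intro d a b
    rw [List.foldl_cons, ih]
    set a' := (PySem.List.pyGet? r 0).getD 0 with ha'
    set b' := (PySem.List.pyGet? r 1).getD 0 with hb'
    by_cases haa : a' = a
    · subst haa
      rw [PySem.Dict.getD_eq_get?_getD, PySem.Dict.get?_insert_self, Option.getD_some,
        PySem.Set.mem_add]
      constructor
      · rintro ((h | h) | ⟨r', hr', h0, h1⟩)
        · exact Or.inl (by rw [PySem.Dict.getD_eq_get?_getD] at h ⊢; exact h)
        · exact Or.inr ⟨r, List.mem_cons_self, rfl, h.symm⟩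
        · exact Or.inr ⟨r', List.mem_cons_of_mem r hr', h0, h1⟩
      · rintro (h | ⟨r', hr', h0, h1⟩)
        · exact Or.inl (Or.inl (by rw [PySem.Dict.getD_eq_get?_getD] at h ⊢; exact h))
        · cases hr' with
          | head => exact Or.inl (Or.inr h1.symm)
          | tail _ hmem => exact Or.inr ⟨r', hmem, h0, h1⟩
    · have : (d.insert a' (PySem.Set.add (d.getD a' PySem.Set.empty) b')).getD a PySem.Set.empty
          = d.getD a PySem.Set.empty := by
        rw [PySem.Dict.getD_eq_get?_getD, PySem.Dict.getD_eq_get?_getD,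
          PySem.Dict.get?_insert_of_ne _ _ (fun h => haa h.symm)]
        rw [PySem.Dict.getD_eq_get?_getD]
      rw [this]
      constructor
      · rintro (h | ⟨r', hr', h0, h1⟩)
        · exact Or.inl h
        · exact Or.inr ⟨r', List.mem_cons_of_mem r hr', h0, h1⟩
      · rintro (h | ⟨r', hr', h0, h1⟩)
        · exact Or.inl h
        · cases hr' with
          | head => exact absurd h0 haa
          | tail _ hmem => exact Or.inr ⟨r', hmem, h0, h1⟩

theorem fvisSucc_mem (conditions : List (List Int)) (a b : Int) :
    b ∈ (fvisSucc conditions).getD a PySem.Set.empty ↔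
      ∃ r ∈ conditions, (PySem.List.pyGet? r 0).getD 0 = a ∧ (PySem.List.pyGet? r 1).getD 0 = b := by
  unfold fvisSucc
  rw [fvisSucc_fold_mem conditions PySem.Dict.empty a b]
  simp [PySem.Dict.getD_eq_get?_getD]

-- the scan, generalized over the already-processed prefix
theorem fvisScan_false_iff (succ : PySem.Dict Int (PySem.Set Int)) :
    ∀ (rest pre : List Int) (seen : PySem.Set Int), (∀ x : Int, x ∈ seen ↔ x ∈ pre) →
    (fvisScan succ seen rest = false ↔
      ∃ a b : Int, b ∈ succ.getD a PySem.Set.empty ∧ a ∈ rest ∧ a ∉ pre ∧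
        b ∈ pre ++ rest.take (rest.idxOf a)) := by
  intro rest
  induction rest with
  | nil =>
    intro pre seen hseen
    simp [fvisScan]
  | cons p rest ih =>
    intro pre seen hseen
    by_cases hp : p ∈ pre
    · have hpm : p ∈ seen := (hseen p).mpr hp
      have hct : seen.contains p = true := (PySem.Set.contains_iff seen p).mpr hpm
      rw [show fvisScan succ seen (p :: rest) = fvisScan succ seen rest by
            simp only [fvisScan]; rw [if_pos hct]]
      rw [ih pre seen hseen]
      constructor
      · rintro ⟨a, b, hab, har, hap, hbm⟩
        have hne : a ≠ p := fun h => hap (h ▸ hp)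
        refine ⟨a, b, hab, List.mem_cons_of_mem p har, hap, ?_⟩
        rw [List.idxOf_cons_ne rest (fun h => hne h.symm)]
        simp only [List.take_succ_cons, List.mem_append, List.mem_cons] at hbm ⊢
        rcases hbm with h | h
        · exact Or.inl h
        · exact Or.inr (Or.inr h)
      · rintro ⟨a, b, hab, har, hap, hbm⟩
        have hne : a ≠ p := fun h => hap (h ▸ hp)
        have har' : a ∈ rest := by
          cases har with
          | head => exact absurd rfl hne
          | tail _ h => exact h
        refine ⟨a, b, hab, har', hap, ?_⟩
        rw [List.idxOf_cons_ne rest (fun h => hne h.symm)] at hbm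
        simp only [List.take_succ_cons, List.mem_append, List.mem_cons] at hbm ⊢
        rcases hbm with h | h | h
        · exact Or.inl h
        · exact Or.inl (h ▸ hp)
        · exact Or.inr h
    · have hpm : p ∉ seen := fun h => hp ((hseen p).mp h)
      by_cases hd : PySem.Set.isdisjoint seen (succ.getD p PySem.Set.empty) = true
      · have hcf : ¬ (seen.contains p = true) := fun h => hpm ((PySem.Set.contains_iff seen p).mp h)
        rw [show fvisScan succ seen (p :: rest) = fvisScan succ (PySem.Set.add seen p) rest by
              simp only [fvisScan]; rw [if_neg hcf, if_pos hd]]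
        have hseen' : ∀ x : Int, x ∈ PySem.Set.add seen p ↔ x ∈ pre ++ [p] := by
          intro x
          rw [PySem.Set.mem_add, List.mem_append, List.mem_singleton, hseen]
        rw [ih (pre ++ [p]) _ hseen']
        have hdis := (PySem.Set.isdisjoint_iff seen (succ.getD p PySem.Set.empty)).mp hd
        constructor
        · rintro ⟨a, b, hab, har, hap, hbm⟩
          have hne : a ≠ p := fun h =>
            hap (h ▸ List.mem_append.mpr (Or.inr (List.mem_singleton.mpr rfl)))
          refine ⟨a, b, hab, List.mem_cons_of_mem p har,
            fun h => hap (List.mem_append.mpr (Or.inl h)), ?_⟩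
          rw [List.idxOf_cons_ne rest (fun h => hne h.symm)]
          simp only [List.take_succ_cons, List.mem_append, List.mem_cons,
            List.not_mem_nil, or_false] at hbm ⊢
          rcases hbm with (h | h) | h
          · exact Or.inl h
          · exact Or.inr (Or.inl h)
          · exact Or.inr (Or.inr h)
        · rintro ⟨a, b, hab, har, hap, hbm⟩
          have hne : a ≠ p := by
            intro h; subst h
            rw [List.idxOf_cons_eq rest rfl] at hbm
            simp only [List.take_zero, List.append_nil] at hbm
            exact hdis b ((hseen b).mpr hbm) hab
          have har' : a ∈ rest := by
            cases har with
            | head => exact absurd rfl hne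
            | tail _ h => exact h
          refine ⟨a, b, hab, har', ?_, ?_⟩
          · intro h
            rcases List.mem_append.mp h with h' | h'
            · exact hap h'
            · exact hne (List.mem_singleton.mp h')
          · rw [List.idxOf_cons_ne rest (fun h => hne h.symm)] at hbm
            simp only [List.take_succ_cons, List.mem_append, List.mem_cons,
              List.not_mem_nil, or_false] at hbm ⊢
            rcases hbm with h | h | h
            · exact Or.inl (Or.inl h)
            · exact Or.inl (Or.inr h)
            · exact Or.inr h
      · have hdf := Bool.not_eq_true _ |>.mp hd
        have hcf : ¬ (seen.contains p = true) := fun h => hpm ((PySem.Set.contains_iff seen p).mp h)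
        rw [show fvisScan succ seen (p :: rest) = false by
              simp only [fvisScan]; rw [if_neg hcf, if_neg hd]]
        simp only [true_iff]
        obtain ⟨b, hbseen, hbsucc⟩ : ∃ b, b ∈ seen ∧ b ∈ succ.getD p PySem.Set.empty := by
          by_contra hno
          push Not at hno
          exact hd ((PySem.Set.isdisjoint_iff seen (succ.getD p PySem.Set.empty)).mpr
            (fun x hx => hno x hx))
        refine ⟨p, b, hbsucc, List.mem_cons_self, hp, ?_⟩
        rw [List.idxOf_cons_eq rest rfl]
        simp only [List.take_zero, List.append_nil]
        exact (hseen b).mp hbseen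

theorem index?_getD_of_mem {l : List Int} {x : Int} (h : x ∈ l) :
    ((PySem.List.index? l x).getD 0 : Nat) = l.idxOf x := by
  obtain ⟨k, hk⟩ := Option.isSome_iff_exists.mp ((PySem.List.index?_isSome_iff l x).mpr h)
  have h2 : List.idxOf? x l = some k := by rw [← PySem.List.index?_eq_idxOf?]; exact hk
  rw [hk, Option.getD_some, List.idxOf_eq_getD_idxOf?, h2, Option.getD_some]

theorem valid_sequence_false_iff (seq r : List Int) :
    valid_sequence seq r = false ↔
      ((PySem.List.pyGet? r 0).getD 0 ∈ seq ∧ (PySem.List.pyGet? r 1).getD 0 ∈ seq ∧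
        seq.idxOf ((PySem.List.pyGet? r 1).getD 0) < seq.idxOf ((PySem.List.pyGet? r 0).getD 0)) := by
  set a := (PySem.List.pyGet? r 0).getD 0 with ha
  set b := (PySem.List.pyGet? r 1).getD 0 with hb
  unfold valid_sequence
  rw [← ha, ← hb]
  by_cases hma : a ∈ seq
  · rw [if_pos (by simpa [List.contains_iff_mem] using hma)]
    rw [index?_getD_of_mem hma, PySem.List.slice_to_natCast]
    by_cases hmb : b ∈ seq.take (seq.idxOf a)
    · rw [if_pos (by simpa [List.contains_iff_mem] using hmb)]
      have hbs : b ∈ seq := List.mem_of_mem_take hmb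
      simp [hma, hbs, (List.mem_take_iff_idxOf_lt hbs).mp hmb]
    · rw [if_neg (by simpa [List.contains_iff_mem] using hmb)]
      simp only [Bool.true_eq_false, false_iff]
      rintro ⟨-, hbs, hlt⟩
      exact hmb ((List.mem_take_iff_idxOf_lt hbs).mpr hlt)
  · rw [if_neg (by simpa [List.contains_iff_mem] using hma)]
    simp [hma]

theorem count_eq_iff (conditions : List (List Int)) (seq : List Int) :
    (conditions.foldl (fun c rule => if valid_sequence seq rule == true then c + 1 else c) (0 : Int)
      = (conditions.length : Int)) ↔ ∀ r ∈ conditions, valid_sequence seq r = true := by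
  rw [PySem.List.foldl_count_if]
  simp only [zero_add]
  rw [Int.natCast_inj]
  rw [List.countP_eq_length]
  simp

-- per-sequence agreement of the two judgements
theorem decision_iff (conditions : List (List Int)) (seq : List Int) :
    (conditions.foldl (fun c rule => if valid_sequence seq rule == true then c + 1 else c) (0 : Int)
      = (conditions.length : Int)) ↔
      fvisScan (fvisSucc conditions) PySem.Set.empty seq = true := by
  rw [count_eq_iff]
  rw [← Bool.not_eq_false (fvisScan _ _ _),
    fvisScan_false_iff (fvisSucc conditions) seq [] PySem.Set.empty (by simp [PySem.Set.empty])]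
  constructor
  · rintro hall ⟨a, b, hab, ha, -, hb⟩
    simp only [List.nil_append] at hb
    obtain ⟨r, hr, h0, h1⟩ := (fvisSucc_mem conditions a b).mp hab
    have hbs : b ∈ seq := List.mem_of_mem_take hb
    have : valid_sequence seq r = false := (valid_sequence_false_iff seq r).mpr
      ⟨h0 ▸ ha, h1 ▸ hbs, by
        rw [h0, h1]; exact (List.mem_take_iff_idxOf_lt hbs).mp hb⟩
    rw [hall r hr] at this
    exact Bool.true_eq_false.mp this
  · intro hno r hr
    by_contra hv
    obtain ⟨ha, hbs, hlt⟩ := (valid_sequence_false_iff seq r).mp (Bool.not_eq_true _ |>.mp hv)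
    exact hno ⟨(PySem.List.pyGet? r 0).getD 0, (PySem.List.pyGet? r 1).getD 0,
      (fvisSucc_mem conditions _ _).mpr ⟨r, hr, rfl, rfl⟩, ha, by simp,
      by simpa using (List.mem_take_iff_idxOf_lt hbs).mpr hlt⟩

theorem folds_eq (conditions : List (List Int)) : ∀ (sequences : List (List Int))
    (acc : List (List Int) × List (List Int)),
    sequences.foldl
      (fun acc sequence =>
        let valid_sequence_count : Int :=
          conditions.foldl (fun c rule => if valid_sequence sequence rule == true then c + 1 else c) 0
        if valid_sequence_count = (conditions.length : Int) then
          (acc.1 ++ [sequence], acc.2)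
        else
          let _new_sequence :=
            (PySem.List.pyRange 0 (sequence.length : Int) 1).foldl
              (fun _ i => PySem.List.slice sequence (some i) none ++ PySem.List.slice sequence none (some i))
              []
          (acc.1, acc.2 ++ [sequence])) acc =
    sequences.foldl
      (fun acc sequence =>
        if fvisScan (fvisSucc conditions) PySem.Set.empty sequence then
          (acc.1 ++ [sequence], acc.2)
        else
          (acc.1, acc.2 ++ [sequence])) acc := by
  intro sequences
  induction sequences with
  | nil => intro acc; rfl
  | cons seq rest ih =>
    intro acc
    simp only [List.foldl_cons]
    rw [← ih]
    congr 1
    by_cases hok : fvisScan (fvisSucc conditions) PySem.Set.empty seq = true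
    · rw [if_pos ((decision_iff conditions seq).mpr hok), if_pos hok]
    · have hfalse := Bool.not_eq_true _ |>.mp hok
      rw [if_neg (fun hc => hok ((decision_iff conditions seq).mp hc)), hfalse]
      simp

theorem find_valid_invalid_sequences_pre_witness :
    Dom_find_valid_invalid_sequences pvWitness_find_valid_invalid_sequences.1 pvWitness_find_valid_invalid_sequences.2 ∧
    Pre_find_valid_invalid_sequences pvWitness_find_valid_invalid_sequences.1 pvWitness_find_valid_invalid_sequences.2 := by
  constructor <;> decide

-- ===== VERDICT (by name: the statement is the Claim_ definition above) =====
theorem find_valid_invalid_sequences_spec : Claim_equal_find_valid_invalid_sequences := by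
  intro sequences conditions _ _
  unfold Spec_find_valid_invalid_sequences find_valid_invalid_sequences find_valid_invalid_sequences_alt
  exact folds_eq conditions sequences ([], [])
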